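-- pv_equiv track=rewrite | github.com/AvavaAYA/ctf-writeup-collection | HackPack-2022/cerebrum-boggled/exp.py | code_size
-- ===== SOURCE A (Python) =====
-- def code_size(payload):
-- 	sum = 0
-- 	for i in payload:
-- 		if i == '[' or i == ']': sum += 0xa
-- 		elif i == '<': sum += 0x17
-- 		elif i == ',' or i == '>': sum += 0x1d
-- 		elif i == '.': sum += 0x25
-- 		elif i == '+' or i == '-': assert False
-- 		else: sum += 1
-- 	return sum
-- ===== SOURCE B (Python) =====
-- def code_size(payload):
--     # tabulate: frequency table over distinct characters, then weighted aggregate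
--     freq = {}
--     for ch in payload:
--         freq[ch] = freq.get(ch, 0) + 1
--     assert '+' not in freq and '-' not in freq
--     weights = {'[': 0xa, ']': 0xa, '<': 0x17, ',': 0x1d, '>': 0x1d, '.': 0x25}
--     total = 0
--     for ch, cnt in freq.items():
--         total += cnt * weights.get(ch, 1)
--     return total
-- ===== Notes on version B (the rewrite author's own statement) =====
-- stated objective: faster
-- what changed: Replaces the per-character if/elif weight chain by a frequency table built in one pass plus a weighted aggregate over the distinct characters with a weight dictionary (default 1); on '+'/'-' both A and B raise AssertionError (excluded by Pre_).
import Mathlib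
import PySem

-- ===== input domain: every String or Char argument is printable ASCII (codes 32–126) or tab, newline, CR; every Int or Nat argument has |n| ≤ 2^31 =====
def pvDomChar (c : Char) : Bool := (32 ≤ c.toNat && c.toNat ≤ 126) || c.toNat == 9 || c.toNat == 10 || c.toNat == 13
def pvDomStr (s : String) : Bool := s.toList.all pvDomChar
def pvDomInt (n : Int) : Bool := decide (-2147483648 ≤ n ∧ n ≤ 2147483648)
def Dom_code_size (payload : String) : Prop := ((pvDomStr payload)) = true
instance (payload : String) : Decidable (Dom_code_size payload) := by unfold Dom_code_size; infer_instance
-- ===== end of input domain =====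

-- B replaces A's per-character if/elif weight chain by a frequency table over
-- distinct characters plus a weighted aggregate with a weight dictionary (alternative decomposition).


-- ===== PORT A =====
-- The '+'/'-' branch is 'assert False' (AssertionError) in Python; it is excluded by
-- Pre_code_size, the port leaves the accumulator unchanged there.
def code_size (payload : String) : Int :=
  payload.toList.foldl (fun sum i =>
    if i = '[' ∨ i = ']' then sum + 0xa
    else if i = '<' then sum + 0x17
    else if i = ',' ∨ i = '>' then sum + 0x1d
    else if i = '.' then sum + 0x25
    else if i = '+' ∨ i = '-' then sum
    else sum + 1) 0

-- ===== PORT B =====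
-- Source B's weight dict literal
def bWeights : PySem.Dict Char Int :=
  PySem.Dict.ofList [('[', 0xa), (']', 0xa), ('<', 0x17), (',', 0x1d), ('>', 0x1d), ('.', 0x25)]

-- Source B: build freq table, then sum cnt * weights.get(ch, 1) over its items.
-- (Source B's assert holds under Pre_code_size and computes no part of the result.)
def code_size_alt (payload : String) : Int :=
  let freq : PySem.Dict Char Int :=
    payload.toList.foldl (fun d ch => d.insert ch (d.getD ch 0 + 1)) PySem.Dict.empty
  freq.items.foldl (fun total p => total + p.2 * bWeights.getD p.1 1) 0

-- ===== PRECONDITION & SPEC =====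
-- Pre_ excludes exactly the payloads containing '+' or '-', on which A raises AssertionError.
def Pre_code_size (payload : String) : Prop :=
  '+' ∉ payload.toList ∧ '-' ∉ payload.toList
instance (payload : String) : Decidable (Pre_code_size payload) := by unfold Pre_code_size; infer_instance

def pvWitness_code_size : String := "ab[.]"

def Spec_code_size (payload : String) (out : Int) : Prop := out = code_size_alt payload
instance (payload : String) (out : Int) : Decidable (Spec_code_size payload out) := by unfold Spec_code_size; infer_instance

-- ===== CLAIM (what is proved, stated in full; the proofs are below) =====
def Claim_equal_code_size : Prop := ∀ (payload : String), Dom_code_size payload → Pre_code_size payload → Spec_code_size payload (code_size payload)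

-- ===== LEMMAS AND PROOFS =====

-- A's branch weights as a function (proof helper)
def wA (c : Char) : Int :=
  if c = '[' ∨ c = ']' then 10 else if c = '<' then 23 else if c = ',' ∨ c = '>' then 29
  else if c = '.' then 37 else if c = '+' ∨ c = '-' then 0 else 1

lemma bWeights_getD (c : Char) (h1 : c ≠ '+') (h2 : c ≠ '-') :
    bWeights.getD c 1 = wA c := by
  by_cases e1 : c = '[' ; · subst e1; decide
  by_cases e2 : c = ']' ; · subst e2; decide
  by_cases e3 : c = '<' ; · subst e3; decide
  by_cases e4 : c = ',' ; · subst e4; decide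
  by_cases e5 : c = '>' ; · subst e5; decide
  by_cases e6 : c = '.' ; · subst e6; decide
  have hb : bWeights = PySem.Dict.mk
      [('[', 10), (']', 10), ('<', 23), (',', 29), ('>', 29), ('.', 37)] := by decide
  rw [hb]
  simp [wA, PySem.Dict.getD_eq_get?_getD,
    Ne.symm e1, Ne.symm e2, Ne.symm e3, Ne.symm e4, Ne.symm e5, Ne.symm e6,
    e1, e2, e3, e4, e5, e6, h1, h2, PySem.Dict.get?]

lemma sum_map_ite_single {α : Type} [DecidableEq α] (x : α) (v : Int) :
    ∀ (s : List α), s.Nodup → x ∈ s →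
      (s.map (fun k => if k = x then v else 0)).sum = v := by
  intro s
  induction s with
  | nil => simp
  | cons a t ih =>
    intro hnd hmem
    rcases List.mem_cons.mp hmem with rfl | hm
    · have hx : x ∉ t := (List.nodup_cons.mp hnd).1
      simp only [List.map_cons, List.sum_cons, if_pos]
      have : (t.map (fun k => if k = x then v else 0)).sum = 0 := by
        rw [List.sum_eq_zero]
        intro y hy
        rcases List.mem_map.mp hy with ⟨k, hk, rfl⟩
        have : k ≠ x := fun h => hx (h ▸ hk)
        simp [this]
      simp [this]
    · have hax : a ≠ x := fun h => (List.nodup_cons.mp hnd).1 (h ▸ hm)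
      simp only [List.map_cons, List.sum_cons, if_neg hax]
      rw [ih (List.nodup_cons.mp hnd).2 hm]
      ring

-- sum of weights over a list = weighted count-sum over its distinct elements
lemma core_sum (w : Char → Int) :
    ∀ (l : List Char),
      ((PySem.Set.ofList l).map (fun k => (l.count k : Int) * w k)).sum = (l.map w).sum := by
  intro l
  induction l using List.reverseRecOn with
  | nil => simp [PySem.Set.ofList_nil]
  | append_singleton l x ih =>
    rw [PySem.Set.ofList_append_singleton]
    have hcount : ∀ k : Char, ((l ++ [x]).count k : Int) = (l.count k : Int) + (if k = x then 1 else 0) := by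
      intro k
      rw [List.count_append]
      by_cases h : k = x
      · subst h; simp
      · rw [List.count_eq_zero_of_not_mem (by simp [h] : k ∉ [x])]
        simp [h]

    by_cases hx : x ∈ PySem.Set.ofList l
    · rw [PySem.Set.add_of_mem hx]
      have : ((PySem.Set.ofList l).map (fun k => ((l ++ [x]).count k : Int) * w k)).sum =
          ((PySem.Set.ofList l).map (fun k => (l.count k : Int) * w k)).sum +
          ((PySem.Set.ofList l).map (fun k => if k = x then w x else 0)).sum := by
        rw [← List.sum_map_add]
        apply congrArg List.sum
        apply List.map_congr_left
        intro k _
        rw [hcount k]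
        by_cases h : k = x
        · simp [h]; ring
        · simp [h]
      rw [this, ih, sum_map_ite_single x (w x) _ (PySem.Set.nodup_ofList l) hx]
      simp [List.map_append]
    · rw [PySem.Set.add_of_not_mem hx]
      have hxl : x ∉ l := fun h => hx ((PySem.Set.mem_ofList _ _).mpr h)
      rw [List.map_append, List.sum_append]
      have h1 : ((PySem.Set.ofList l).map (fun k => ((l ++ [x]).count k : Int) * w k)).sum =
          ((PySem.Set.ofList l).map (fun k => (l.count k : Int) * w k)).sum := by
        apply congrArg List.sum
        apply List.map_congr_left
        intro k hk
        have hkx : k ≠ x := fun h => hx (h ▸ hk)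
        rw [hcount k, if_neg hkx]
        ring
      have h2 : ((l ++ [x]).count x : Int) = 1 := by
        simp [List.count_append, List.count_eq_zero_of_not_mem hxl]
      rw [h1, ih]
      have h3 : (l.count x : Int) = 0 := by
        rw [List.count_eq_zero_of_not_mem hxl]; rfl
      simp [List.map_append, List.count_append, h3]

-- ===== VERDICT (by name: the statement is the Claim_ definition above) =====
theorem code_size_spec : Claim_equal_code_size := by
  intro payload _ hpre
  rcases hpre with ⟨hp, hm⟩
  unfold Spec_code_size code_size code_size_alt
  set l := payload.toList with hl
  -- A side: branchy foldl = sum of wA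
  have hstep : (fun (sum : Int) (i : Char) =>
      if i = '[' ∨ i = ']' then sum + 0xa
      else if i = '<' then sum + 0x17
      else if i = ',' ∨ i = '>' then sum + 0x1d
      else if i = '.' then sum + 0x25
      else if i = '+' ∨ i = '-' then sum
      else sum + 1) = (fun (sum : Int) (i : Char) => sum + wA i) := by
    funext s c
    simp only [wA]
    split_ifs <;> ring
  rw [hstep, PySem.List.foldl_add]
  -- B side: freq is the counter; its items enumerate distinct chars with counts
  rw [PySem.Dict.foldl_insert_getD_add_one_eq_counter, PySem.List.foldl_add,
    PySem.Dict.items_counter, List.map_map]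
  have hcongr : ((PySem.Set.ofList l).map
      ((fun p : Char × Int => p.2 * bWeights.getD p.1 1) ∘ fun k => (k, (l.count k : Int)))) =
      ((PySem.Set.ofList l).map (fun k => (l.count k : Int) * wA k)) := by
    apply List.map_congr_left
    intro k hk
    have hkl : k ∈ l := (PySem.Set.mem_ofList _ _).mp hk
    have h1 : k ≠ '+' := fun h => hp (h ▸ hkl)
    have h2 : k ≠ '-' := fun h => hm (h ▸ hkl)
    simp [Function.comp, bWeights_getD k h1 h2]
  rw [hcongr, core_sum wA l]
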